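-- pv_equiv track=rewrite | github.com/tudormihaita/ubb-computer-science-projects | Semester 1/Computational Logic/LC-BaseConversions-ArithmeticOperations/operatii_aritmetice/operatii.py | impartirea_la_o_cifra
-- ===== SOURCE A (Python) =====
-- to_baza16 = {
--     0: '0', 1: '1', 2: '2', 3: '3', 4: '4', 5: '5', 6: '6', 7: '7', 8: '8', 9: '9',
--     10: 'A', 11: 'B', 12: 'C', 13: 'D', 14: 'E', 15: 'F'
-- }
--
-- from_baza16 = {
--     '0': 0, '1': 1, '2': 2, '3': 3, '4': 4, '5': 5, '6': 6, '7': 7, '8': 8, '9': 9, '10': 10,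
--     'A': 10, 'B': 11, 'C': 12, 'D': 13, 'E': 14, 'F': 15, '16': 16
-- }
--
-- def impartirea_la_o_cifra(nr, cifra, baza):
--     """
--     realizeaza operatia de impartire a numarului nr la cifra data intr-o baza oarecare, respectand algoritmul:
--     an an-1 ... a1 a0 (p) : b (p) = cn cn-1 ... c1 c0 (p) rest r(p)
--
--     i=n,0 , tn=0
--
--     (ti*p+ai):b = ci rest ti-1
--     r := t -1
--
--     :param nr: numar natural, dat sub forma de string
--     :param cifra: numar natural <= 9 ( sau <= F in cazul calculelor in baza 16 )
--     :param baza: baza p oarecare, 2-10 sau 16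
--     :return: rezultatul impartirii numarului nr la cifra data, in baza specificata
--     """
--     rez_cat = ""
--     rez_rest = ""
--     cat = 0
--     rest = 0
--     for i in range(len(nr)):
--         d = rest * baza + from_baza16[nr[i]]
--         cat = d // from_baza16[cifra]
--         rest = d % from_baza16[cifra]
--         rez_cat = rez_cat + to_baza16[cat]
--     rez_rest = to_baza16[rest]
--
--     if len(rez_cat) > 1:
--         while rez_cat[0] == '0':
--             rez_cat = rez_cat[1:]
--
--     return rez_cat, rez_rest
-- ===== SOURCE B (Python) =====
-- DIGITS = "0123456789ABCDEF"
--
--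
-- def _to_base(q, baza):
--     # canonical base-`baza` numeral of q, built by recursion (no leading zeros)
--     if q < baza:
--         return DIGITS[q]
--     q2, d = divmod(q, baza)
--     return _to_base(q2, baza) + DIGITS[d]
--
--
-- def impartirea_la_o_cifra(nr, cifra, baza):
--     # Parse the whole numeral into one integer, divide once, re-encode the quotient.
--     if not nr:
--         return ("", "0")
--     value = 0
--     for c in nr:
--         value = value * baza + DIGITS.index(c)
--     q, r = divmod(value, DIGITS.index(cifra))
--     return (_to_base(q, baza), DIGITS[r])
-- ===== Notes on version B (the rewrite author's own statement) =====
-- stated objective: simpler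
-- what changed: A does digit-by-digit long division over the string with a carry, pads the quotient to the input's length and then strips leading zeros; B parses the whole numeral into one integer by positional indexing into the digit string '0123456789ABCDEF', performs a single divmod, and re-encodes the quotient recursively, never producing leading zeros; …
-- outside the precondition, e.g. on impartirea_la_o_cifra('55', '10', 8): A returns ('4', '5'), B raises ValueError; on impartirea_la_o_cifra('F', '1', 2): A returns ('F', '0'), B returns ('1111', '0'); on impartirea_la_o_cifra('5', '2', 0): A returns ('2', '1'), B raises ZeroDivisionError
-- crash fix: On inputs whose numeral has length >= 2 but value smaller than the divisor digit, A's leading-zero strip loop empties the quotient string and raises IndexError, while B returns ('0', remainder-digit). — e.g. on impartirea_la_o_cifra("01", "2", 10): A raises IndexError, B returns ("0", "1")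
import Mathlib
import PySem

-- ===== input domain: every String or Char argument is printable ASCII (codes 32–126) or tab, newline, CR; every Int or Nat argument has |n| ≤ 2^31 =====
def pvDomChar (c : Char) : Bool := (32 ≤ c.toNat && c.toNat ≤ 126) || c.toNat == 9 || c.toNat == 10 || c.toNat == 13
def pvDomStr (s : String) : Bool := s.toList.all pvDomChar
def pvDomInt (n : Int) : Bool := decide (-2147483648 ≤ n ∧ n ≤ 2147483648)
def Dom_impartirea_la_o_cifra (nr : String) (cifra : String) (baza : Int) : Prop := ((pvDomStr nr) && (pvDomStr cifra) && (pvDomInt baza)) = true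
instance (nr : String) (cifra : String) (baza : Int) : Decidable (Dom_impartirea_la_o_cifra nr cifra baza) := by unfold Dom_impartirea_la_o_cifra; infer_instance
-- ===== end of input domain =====

-- B replaces A's digit-by-digit long division (carry loop, padded quotient string, leading-zero
-- strip) by: parse the numeral into one integer by positional indexing into "0123456789ABCDEF",
-- one divmod, recursive re-encoding of the quotient; objective: simpler.

-- ===== PORT A =====
def pvTo16 : PySem.Dict Int Char := PySem.Dict.ofList
  [(0,'0'),(1,'1'),(2,'2'),(3,'3'),(4,'4'),(5,'5'),(6,'6'),(7,'7'),(8,'8'),(9,'9'),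
   (10,'A'),(11,'B'),(12,'C'),(13,'D'),(14,'E'),(15,'F')]
def pvTo16c (d : Int) : Char := pvTo16.getD d '?'
def pvFrom16c : PySem.Dict Char Int := PySem.Dict.ofList
  [('0',0),('1',1),('2',2),('3',3),('4',4),('5',5),('6',6),('7',7),('8',8),('9',9),
   ('A',10),('B',11),('C',12),('D',13),('E',14),('F',15)]
def pvFrom16s : PySem.Dict String Int := PySem.Dict.ofList
  [("0",0),("1",1),("2",2),("3",3),("4",4),("5",5),("6",6),("7",7),("8",8),("9",9),
   ("10",10),("A",10),("B",11),("C",12),("D",13),("E",14),("F",15),("16",16)]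
-- from_baza16[c] for a one-character string (lookup of nr[i]; keys "10"/"16" can never match a single char)
def pvDv (c : Char) : Int := pvFrom16c.getD c (-1)
-- from_baza16[cifra] for the full string cifra
def pvCV (s : String) : Int := pvFrom16s.getD s (-1)
-- one iteration of A's for-loop; state = (cat, rest, rez_cat)
def pvStepA (b v : Int) (st : Int × Int × List Char) (c : Char) : Int × Int × List Char :=
  let d := st.2.1 * b + pvDv c
  (PySem.Int.floordiv d v, PySem.Int.mod d v, st.2.2 ++ [pvTo16c (PySem.Int.floordiv d v)])
-- A's "while rez_cat[0] == '0'" strip loop (on an all-zero string Python raises IndexError; excluded by Pre_)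
def pvStrip : List Char → List Char
  | [] => []
  | c :: t => if c = '0' then pvStrip t else c :: t
def impartirea_la_o_cifra (nr : String) (cifra : String) (baza : Int) : String × String :=
  let v := pvCV cifra
  let st := nr.toList.foldl (pvStepA baza v) (0, 0, [])
  let rez_rest := String.ofList [pvTo16c st.2.1]
  let rez_cat := if st.2.2.length > 1 then pvStrip st.2.2 else st.2.2
  (String.ofList rez_cat, rez_rest)

-- ===== PORT B =====
-- DIGITS = "0123456789ABCDEF"
def pvHex : List Char := ['0','1','2','3','4','5','6','7','8','9','A','B','C','D','E','F']
-- _to_base: recursive canonical base-b numeral of q (the b ≤ 1 disjunct only makes the recursion total; Pre_ has 2 ≤ baza)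
def pvToBase (b : Int) (q : Int) : List Char :=
  if h : b ≤ 1 ∨ q < b then [(PySem.List.pyGet? pvHex q).getD '?']
  else pvToBase b (PySem.Int.floordiv q b) ++ [(PySem.List.pyGet? pvHex (PySem.Int.mod q b)).getD '?']
termination_by q.toNat
decreasing_by
  have hb : (1:Int) < b := by omega
  have hq : (0:Int) < q := by omega
  have h2 : PySem.Int.floordiv q b < q :=
    (PySem.Int.floordiv_lt_iff_lt_mul (by omega)).mpr (by nlinarith [hb, hq])
  have h3 : (0:Int) ≤ PySem.Int.floordiv q b :=
    (PySem.Int.le_floordiv_iff_mul_le (by omega)).mpr (by nlinarith [hb, hq])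
  omega
def impartirea_la_o_cifra_alt (nr : String) (cifra : String) (baza : Int) : String × String :=
  if nr.toList = [] then ("", "0")
  else
    let value := nr.toList.foldl
      (fun v c => v * baza + ((PySem.List.index? pvHex c).getD 16 : Int)) 0
    let d : Int := PySem.Str.find "0123456789ABCDEF" cifra
    let q := PySem.Int.floordiv value d
    let r := PySem.Int.mod value d
    (String.ofList (pvToBase baza q), String.ofList [(PySem.List.pyGet? pvHex r).getD '?'])

-- ===== PRECONDITION & SPEC =====
-- value of cifra read as ONE digit (-1 unless cifra is a single hex-digit character)
def pvCifD (cifra : String) : Int :=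
  if cifra.toList.length = 1 then pvDv (cifra.toList.headD '?') else -1
-- base-baza value of the digit string, via A's per-character table
def pvVal (b : Int) (l : List Char) : Int := l.foldl (fun acc c => acc * b + pvDv c) 0
-- Pre_ admits the empty string (A returns ("","0") without touching cifra), and otherwise inputs
-- on which A performs genuine base-baza division: baza >= 2, cifra a single hex-digit character of
-- value >= 1, every digit of nr a hex digit smaller than baza, and (so that A's hex output table
-- suffices) baza <= 16 or divisor 1 or a one-digit numeral with small quotient.  It excludes
-- (a) inputs where A raises (KeyError on a non-digit or an out-of-table quotient digit,
-- ZeroDivisionError on cifra "0", and the strip loop's IndexError when len(nr) >= 2 and the value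
-- is below the divisor — see Raises_ below), and (b) inputs on which A still returns but
-- accidentally: multi-character cifra (the table's leftover string keys "10"/"16", on which B
-- raises ValueError), digits >= baza or baza <= 1 (A's digit-wise output is not base-baza
-- arithmetic there; B raises ZeroDivisionError on baza 0), and multi-digit numerals with
-- baza > 16 and divisor >= 2 whose quotient digits happen to stay below 16 (see cites).
def Pre_impartirea_la_o_cifra (nr : String) (cifra : String) (baza : Int) : Prop :=
  nr.toList = [] ∨
  (2 ≤ baza ∧ 1 ≤ pvCifD cifra ∧ (baza ≤ 16 ∨ pvCifD cifra = 1) ∧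
   (nr.toList.all (fun c => decide (0 ≤ pvDv c) && decide (pvDv c < baza))) = true ∧
   ¬(2 ≤ nr.toList.length ∧ pvVal baza nr.toList < pvCifD cifra)) ∨
  (nr.toList.length = 1 ∧ 2 ≤ baza ∧ 1 ≤ pvCifD cifra ∧
   0 ≤ pvDv (nr.toList.headD '?') ∧ pvDv (nr.toList.headD '?') / pvCifD cifra < baza)
instance (nr : String) (cifra : String) (baza : Int) : Decidable (Pre_impartirea_la_o_cifra nr cifra baza) := by
  unfold Pre_impartirea_la_o_cifra; infer_instance
def pvWitness_impartirea_la_o_cifra : String × String × Int := ("12", "2", 10)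

-- On inputs whose numeral has length >= 2 but value smaller than the divisor digit, A's
-- leading-zero strip loop empties the quotient string and raises IndexError, while B returns
-- ('0', remainder-digit).
def Raises_impartirea_la_o_cifra (nr : String) (cifra : String) (baza : Int) : Prop :=
  1 ≤ baza ∧ 1 ≤ pvCifD cifra ∧
  (nr.toList.all (fun c => decide (0 ≤ pvDv c))) = true ∧
  2 ≤ nr.toList.length ∧ pvVal baza nr.toList < pvCifD cifra
instance (nr : String) (cifra : String) (baza : Int) : Decidable (Raises_impartirea_la_o_cifra nr cifra baza) := by
  unfold Raises_impartirea_la_o_cifra; infer_instance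
def pvRaiseWitness_impartirea_la_o_cifra : String × String × Int := ("01", "2", 10)
def pvRaiseWitnessOut_impartirea_la_o_cifra : String × String := ("0", "1")

def Spec_impartirea_la_o_cifra (nr : String) (cifra : String) (baza : Int) (out : String × String) : Prop := out = impartirea_la_o_cifra_alt nr cifra baza
instance (nr : String) (cifra : String) (baza : Int) (out : String × String) : Decidable (Spec_impartirea_la_o_cifra nr cifra baza out) := by unfold Spec_impartirea_la_o_cifra; infer_instance

-- ===== CLAIM (what is proved, stated in full; the proofs are below) =====
def Claim_equal_impartirea_la_o_cifra : Prop := ∀ (nr : String) (cifra : String) (baza : Int), Dom_impartirea_la_o_cifra nr cifra baza → Pre_impartirea_la_o_cifra nr cifra baza → Spec_impartirea_la_o_cifra nr cifra baza (impartirea_la_o_cifra nr cifra baza)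
def Claim_raises_impartirea_la_o_cifra : Prop := (∀ (nr : String) (cifra : String) (baza : Int), Dom_impartirea_la_o_cifra nr cifra baza → Raises_impartirea_la_o_cifra nr cifra baza → ¬ Pre_impartirea_la_o_cifra nr cifra baza) ∧ (Dom_impartirea_la_o_cifra (pvRaiseWitness_impartirea_la_o_cifra.1) (pvRaiseWitness_impartirea_la_o_cifra.2.1) (pvRaiseWitness_impartirea_la_o_cifra.2.2) ∧ Raises_impartirea_la_o_cifra (pvRaiseWitness_impartirea_la_o_cifra.1) (pvRaiseWitness_impartirea_la_o_cifra.2.1) (pvRaiseWitness_impartirea_la_o_cifra.2.2) ∧ impartirea_la_o_cifra_alt (pvRaiseWitness_impartirea_la_o_cifra.1) (pvRaiseWitness_impartirea_la_o_cifra.2.1) (pvRaiseWitness_impartirea_la_o_cifra.2.2) = pvRaiseWitnessOut_impartirea_la_o_cifra)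

-- ===== LEMMAS AND PROOFS =====

-- the quotient digits produced by A's long division, as integers
def pvQDigits (b v r0 : Int) : List Char → List Int
  | [] => []
  | c :: t => PySem.Int.floordiv (r0 * b + pvDv c) v ::
      pvQDigits b v (PySem.Int.mod (r0 * b + pvDv c) v) t
-- the final carry of A's long division
def pvRFin (b v r0 : Int) : List Char → Int
  | [] => r0
  | c :: t => pvRFin b v (PySem.Int.mod (r0 * b + pvDv c) v) t
-- base-b value of an integer digit list, from accumulator x
def pvBV (b x : Int) (ds : List Int) : Int := ds.foldl (fun a d => a * b + d) x
-- base-b value of a char list, from accumulator x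
def pvValF (b x : Int) (l : List Char) : Int := l.foldl (fun acc c => acc * b + pvDv c) x

theorem pvBV_cons (b x d : Int) (ds : List Int) : pvBV b x (d :: ds) = pvBV b (x * b + d) ds := rfl
theorem pvValF_cons (b x : Int) (c : Char) (t : List Char) :
    pvValF b x (c :: t) = pvValF b (x * b + pvDv c) t := rfl

theorem pvFoldA (b v : Int) : ∀ (l : List Char) (c0 r0 : Int) (acc : List Char),
    List.foldl (pvStepA b v) (c0, r0, acc) l
      = ((pvQDigits b v r0 l).getLastD c0, pvRFin b v r0 l,
         acc ++ (pvQDigits b v r0 l).map pvTo16c) := by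
  intro l
  induction l with
  | nil => intro c0 r0 acc; simp [pvQDigits, pvRFin]
  | cons c t ih =>
    intro c0 r0 acc
    simp only [List.foldl_cons, pvStepA, pvQDigits, pvRFin, ih, List.getLastD_cons,
      List.map_cons, List.append_assoc, List.singleton_append]

theorem pvValF_mod_congr (b v : Int) (hv : 0 < v) :
    ∀ (t : List Char) (x y : Int), x % v = y % v → pvValF b x t % v = pvValF b y t % v := by
  intro t
  induction t with
  | nil => intro x y h; simpa [pvValF] using h
  | cons c t ih =>
    intro x y h
    rw [pvValF_cons, pvValF_cons]
    apply ih
    conv_lhs => rw [Int.add_emod, Int.mul_emod, h, ← Int.mul_emod, ← Int.add_emod]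

theorem pvRFin_eq (b v : Int) (hv : 0 < v) :
    ∀ (l : List Char) (r0 : Int), 0 ≤ r0 → r0 < v → pvRFin b v r0 l = pvValF b r0 l % v := by
  intro l
  induction l with
  | nil => intro r0 h1 h2; simp [pvRFin, pvValF, Int.emod_eq_of_lt h1 h2]
  | cons c t ih =>
    intro r0 h1 h2
    simp only [pvRFin]
    rw [pvValF_cons, PySem.Int.mod_eq_emod_of_pos hv]
    rw [ih _ (Int.emod_nonneg _ (by omega)) (Int.emod_lt_of_pos _ hv)]
    exact pvValF_mod_congr b v hv t _ _ (Int.emod_emod_of_dvd _ (dvd_refl v))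

theorem pvQDigits_length (b v : Int) : ∀ (l : List Char) (r0 : Int),
    (pvQDigits b v r0 l).length = l.length := by
  intro l; induction l with
  | nil => intro r0; simp [pvQDigits]
  | cons c t ih => intro r0; simp [pvQDigits, ih]

theorem pvBV_qDigits (b v : Int) (hv : 0 < v) :
    ∀ (l : List Char) (r0 x : Int), 0 ≤ r0 → r0 < v →
      pvBV b x (pvQDigits b v r0 l) = pvValF b (x * v + r0) l / v := by
  intro l
  induction l with
  | nil =>
    intro r0 x h1 h2
    show x = (x * v + r0) / v
    rw [show x * v + r0 = r0 + v * x by ring, Int.add_mul_ediv_left _ _ (by omega : v ≠ 0),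
      Int.ediv_eq_zero_of_lt h1 h2]
    ring
  | cons c t ih =>
    intro r0 x h1 h2
    simp only [pvQDigits]
    rw [pvBV_cons, pvValF_cons,
        PySem.Int.floordiv_eq_ediv_of_pos hv, PySem.Int.mod_eq_emod_of_pos hv,
        ih _ _ (Int.emod_nonneg _ (by omega)) (Int.emod_lt_of_pos _ hv)]
    have hE : v * ((r0 * b + pvDv c) / v) + (r0 * b + pvDv c) % v = r0 * b + pvDv c :=
      Int.ediv_add_emod _ _
    have hacc : (x * b + (r0 * b + pvDv c) / v) * v + (r0 * b + pvDv c) % v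
        = (x * v + r0) * b + pvDv c := by linear_combination hE
    rw [hacc]

theorem pvQDigits_bounds (b v : Int) (hv : 0 < v) (hb : 0 < b) :
    ∀ (l : List Char) (r0 : Int), 0 ≤ r0 → r0 < v → (∀ c ∈ l, 0 ≤ pvDv c ∧ pvDv c < b) →
      ∀ d ∈ pvQDigits b v r0 l, 0 ≤ d ∧ d < b := by
  intro l
  induction l with
  | nil => intro r0 _ _ _ d hd; simp [pvQDigits] at hd
  | cons c t ih =>
    intro r0 h1 h2 hdig d hd
    have hc := hdig c (by simp)
    have hm : PySem.Int.mod (r0 * b + pvDv c) v = (r0 * b + pvDv c) % v :=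
      PySem.Int.mod_eq_emod_of_pos hv
    simp only [pvQDigits, List.mem_cons] at hd
    rcases hd with rfl | hd
    · constructor
      · rw [PySem.Int.le_floordiv_iff_mul_le hv]; nlinarith [hc.1]
      · rw [PySem.Int.floordiv_lt_iff_lt_mul hv]; nlinarith [hc.1, hc.2]
    · rw [hm] at hd
      exact ih _ (Int.emod_nonneg _ (by omega)) (Int.emod_lt_of_pos _ hv)
        (fun c' hc' => hdig c' (by simp [hc'])) d hd

theorem pvTo16c_eq_zero_iff (d : Int) (h1 : 0 ≤ d) (h2 : d < 16) :
    pvTo16c d = '0' ↔ d = 0 := by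
  interval_cases d <;> simp [pvTo16c, pvTo16] <;> decide

theorem pvStrip_map :
    ∀ (ds : List Int), (∀ d ∈ ds, 0 ≤ d ∧ d ≤ 15) →
      pvStrip (ds.map pvTo16c) = (ds.dropWhile (fun d => d == 0)).map pvTo16c := by
  intro ds
  induction ds with
  | nil => intro _; simp [pvStrip]
  | cons d t ih =>
    intro hd
    have h := hd d (by simp)
    have hz := pvTo16c_eq_zero_iff d h.1 (by omega)
    by_cases h0 : d = 0
    · subst h0
      have hzz : pvTo16c 0 = '0' := hz.mpr rfl
      simp [pvStrip, hzz, ih (fun x hx => hd x (by simp [hx]))]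
    · have hzz : ¬ pvTo16c d = '0' := fun hh => h0 (hz.mp hh)
      simp [pvStrip, hzz, h0, List.dropWhile_cons]

theorem pvBV_dropWhile (b : Int) : ∀ (ds : List Int),
    pvBV b 0 (ds.dropWhile (fun d => d == 0)) = pvBV b 0 ds := by
  intro ds
  induction ds with
  | nil => rfl
  | cons d t ih =>
    by_cases h0 : d = 0
    · simp only [List.dropWhile_cons, h0]
      simpa [pvBV_cons] using ih
    · simp [List.dropWhile_cons, h0]

theorem pvDropWhile_head : ∀ (ds : List Int),
    (ds.dropWhile (fun d => d == 0)) = [] ∨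
      ∃ d t, ds.dropWhile (fun d => d == 0) = d :: t ∧ d ≠ 0 := by
  intro ds
  induction ds with
  | nil => left; rfl
  | cons d t ih =>
    by_cases h0 : d = 0
    · simpa [List.dropWhile_cons, h0] using ih
    · right; exact ⟨d, t, by simp [List.dropWhile_cons, h0], h0⟩

theorem pvBV_pos (b : Int) (hb : 0 < b) : ∀ (ds : List Int) (x : Int),
    0 < x → (∀ d ∈ ds, 0 ≤ d) → 0 < pvBV b x ds := by
  intro ds
  induction ds with
  | nil => intro x hx _; simpa [pvBV] using hx
  | cons d t ih =>
    intro x hx hd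
    have := hd d (by simp)
    rw [pvBV_cons]
    exact ih _ (by nlinarith) (fun d' h' => hd d' (by simp [h']))

theorem pvValF_nonneg (b : Int) (hb : 0 < b) : ∀ (t : List Char) (x : Int),
    0 ≤ x → (∀ c ∈ t, 0 ≤ pvDv c) → 0 ≤ pvValF b x t := by
  intro t
  induction t with
  | nil => intro x hx _; simpa [pvValF] using hx
  | cons c t ih =>
    intro x hx hd
    have := hd c (by simp)
    rw [pvValF_cons]
    exact ih _ (by nlinarith) (fun c' h' => hd c' (by simp [h']))

theorem pvListLen1 {α : Type} : ∀ (l : List α), l.length = 1 → ∃ a, l = [a] := by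
  intro l h
  cases l with
  | nil => simp at h
  | cons a t =>
    cases t with
    | nil => exact ⟨a, rfl⟩
    | cons b t => simp at h

-- hex-digit facts linking A's lookup tables with B's digit string
theorem pvDv_mem (c : Char) (h : 0 ≤ pvDv c) : c ∈ pvHex := by
  by_contra hc
  have hk : pvFrom16c.keys = pvHex := by decide
  have hcon : pvFrom16c.contains c = false := by
    rw [Bool.eq_false_iff]
    intro hcc
    exact hc (hk ▸ (PySem.Dict.contains_iff_mem_keys pvFrom16c c).mp hcc)
  have hD := PySem.Dict.getD_of_not_contains pvFrom16c (-1 : Int) hcon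
  rw [pvDv, hD] at h
  omega

theorem pvDv_idx (c : Char) (h : c ∈ pvHex) :
    pvDv c = ((PySem.List.index? pvHex c).getD 16 : Int) ∧ pvDv c ≤ 15 := by
  fin_cases h <;> exact ⟨by decide, by decide⟩

theorem pvCif_val (cifra : String) (c : Char) (hc : c ∈ pvHex) (h : cifra.toList = [c]) :
    PySem.Str.find "0123456789ABCDEF" cifra = pvDv c ∧ pvCV cifra = pvDv c := by
  have hs : cifra = String.ofList [c] := String.toList_inj.mp (by rw [h]; simp)
  subst hs
  fin_cases hc <;> exact ⟨by decide, by decide⟩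

theorem pvDigitChar (d : Int) (h1 : 0 ≤ d) (h2 : d < 16) :
    (PySem.List.pyGet? pvHex d).getD '?' = pvTo16c d := by
  interval_cases d <;> decide

theorem pvParse_eq (b : Int) : ∀ (l : List Char) (x : Int), (∀ c ∈ l, 0 ≤ pvDv c) →
    l.foldl (fun v c => v * b + ((PySem.List.index? pvHex c).getD 16 : Int)) x = pvValF b x l := by
  intro l
  induction l with
  | nil => intro x _; rfl
  | cons c t ih =>
    intro x hd
    have hc := (pvDv_idx c (pvDv_mem c (hd c (by simp)))).1
    rw [List.foldl_cons, pvValF_cons, ← hc, ih _ (fun c' h' => hd c' (by simp [h']))]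

theorem pvToBase_zero (b : Int) (hb : 0 < b) : pvToBase b 0 = ['0'] := by
  rw [pvToBase, dif_pos (Or.inr hb)]
  decide

theorem pvToBase_map (b : Int) (hb1 : 1 < b) : ∀ (ds : List Int),
    (∀ d ∈ ds, 0 ≤ d ∧ d < b ∧ d ≤ 15) → (∃ d0 t, ds = d0 :: t ∧ d0 ≠ 0) →
      pvToBase b (pvBV b 0 ds) = ds.map pvTo16c := by
  intro ds
  induction ds using List.reverseRecOn with
  | nil =>
    intro _ hh
    obtain ⟨d0, t, ht, -⟩ := hh
    simp at ht
  | append_singleton t d ih =>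
    intro hdig hh
    have hd := hdig d (by simp)
    have hBV : pvBV b 0 (t ++ [d]) = pvBV b 0 t * b + d := by
      simp [pvBV, List.foldl_append]
    rcases t with _ | ⟨d0, t0⟩
    · obtain ⟨d0', t', ht, hne⟩ := hh
      simp only [List.nil_append, List.cons.injEq] at ht
      have hdne : d ≠ 0 := by omega
      simp only [List.nil_append]
      have hv : pvBV b 0 [d] = d := by simp [pvBV]
      rw [hv, pvToBase, dif_pos (Or.inr hd.2.1), pvDigitChar d hd.1 (by omega)]
      simp
    · obtain ⟨d0', t', ht, hne⟩ := hh
      simp only [List.cons_append, List.cons.injEq] at ht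
      have hd0 : d0 ≠ 0 := by omega
      have hdig' : ∀ x ∈ d0 :: t0, 0 ≤ x ∧ x < b ∧ x ≤ 15 := fun x hx => hdig x (by
        simp only [List.cons_append, List.mem_cons, List.mem_append] at hx ⊢; tauto)
      have hpos : 0 < pvBV b 0 (d0 :: t0) := by
        rw [pvBV_cons, zero_mul, zero_add]
        exact pvBV_pos b (by omega) t0 d0
          (by have := (hdig' d0 (by simp)).1; omega)
          (fun x hx => (hdig' x (by simp [hx])).1)
      rw [hBV]
      have hval : ¬(b ≤ 1 ∨ pvBV b 0 (d0 :: t0) * b + d < b) := by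
        push_neg
        exact ⟨by omega, by nlinarith [hd.1]⟩
      rw [pvToBase, dif_neg hval]
      have hfd : PySem.Int.floordiv (pvBV b 0 (d0 :: t0) * b + d) b = pvBV b 0 (d0 :: t0) := by
        rw [PySem.Int.floordiv_eq_ediv_of_pos (by omega : (0:Int) < b),
          show pvBV b 0 (d0 :: t0) * b + d = d + b * pvBV b 0 (d0 :: t0) by ring,
          Int.add_mul_ediv_left _ _ (by omega : b ≠ 0), Int.ediv_eq_zero_of_lt hd.1 hd.2.1]
        ring
      have hmd : PySem.Int.mod (pvBV b 0 (d0 :: t0) * b + d) b = d := by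
        rw [PySem.Int.mod_eq_emod_of_pos (by omega : (0:Int) < b),
          show pvBV b 0 (d0 :: t0) * b + d = d + b * pvBV b 0 (d0 :: t0) by ring,
          Int.add_mul_emod_self_left, Int.emod_eq_of_lt hd.1 hd.2.1]
      rw [hfd, hmd, ih hdig' ⟨d0, t0, rfl, hd0⟩, pvDigitChar d hd.1 (by omega)]
      simp

-- with divisor 1 A's quotient digits are the input digits themselves
theorem pvQDigits_one (b : Int) : ∀ (l : List Char), pvQDigits b 1 0 l = l.map pvDv := by
  intro l
  induction l with
  | nil => rfl
  | cons c t ih =>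
    simp only [pvQDigits, List.map_cons, zero_mul, zero_add,
      PySem.Int.floordiv_eq_ediv_of_pos (by omega : (0:Int) < 1),
      PySem.Int.mod_eq_emod_of_pos (by omega : (0:Int) < 1),
      Int.ediv_one, Int.emod_one, ih]

-- main equivalence on nonempty nr
theorem pvMain (nr cifra : String) (baza : Int)
    (hb2 : 2 ≤ baza) (hsp : baza ≤ 16 ∨ pvCifD cifra = 1) (hc1 : 1 ≤ pvCifD cifra)
    (hdig : ∀ c ∈ nr.toList, 0 ≤ pvDv c ∧ pvDv c < baza)
    (hnc : ¬(2 ≤ nr.toList.length ∧ pvVal baza nr.toList < pvCifD cifra))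
    (hne : nr.toList ≠ []) :
    impartirea_la_o_cifra nr cifra baza = impartirea_la_o_cifra_alt nr cifra baza := by
  -- extract the single divisor character
  obtain ⟨c, hcl⟩ : ∃ c, cifra.toList = [c] := by
    rcases hl : cifra.toList with _ | ⟨c, _ | ⟨c', t⟩⟩
    · simp [pvCifD, hl] at hc1
    · exact ⟨c, rfl⟩
    · simp [pvCifD, hl] at hc1
  have hcd : pvCifD cifra = pvDv c := by simp [pvCifD, hcl]
  rw [hcd] at hc1 hnc hsp
  have hmem : c ∈ pvHex := pvDv_mem c (by omega)
  have h15 : pvDv c ≤ 15 := (pvDv_idx c hmem).2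
  obtain ⟨hfind, hcv⟩ := pvCif_val cifra c hmem hcl
  set b := baza with hbdef
  set v := pvDv c with hvdef
  have hv0 : (0:Int) < v := by omega
  have hb0 : (0:Int) < b := by omega
  set l := nr.toList with hldef
  set ds := pvQDigits b v 0 l with hds
  have hlen : ds.length = l.length := pvQDigits_length b v l 0
  have hbounds : ∀ d ∈ ds, 0 ≤ d ∧ d < b :=
    pvQDigits_bounds b v hv0 hb0 l 0 le_rfl hv0 hdig
  -- in both admitted regimes every quotient digit fits A's hex table
  have hb15 : ∀ d ∈ ds, 0 ≤ d ∧ d < b ∧ d ≤ 15 := by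
    rcases hsp with hb16 | hv1
    · intro d hd
      have := hbounds d hd
      exact ⟨this.1, this.2, by omega⟩
    · intro d hd
      rw [hds, hv1, pvQDigits_one b l] at hd
      obtain ⟨c', hc', rfl⟩ := List.mem_map.mp hd
      have h1 := hdig c' hc'
      have h2 := (pvDv_idx c' (pvDv_mem c' h1.1)).2
      exact ⟨h1.1, h1.2, h2⟩
  have hvalnn : 0 ≤ pvVal b l :=
    pvValF_nonneg b hb0 l 0 le_rfl (fun c' hc' => (hdig c' hc').1)
  have hrfin : pvRFin b v 0 l = pvVal b l % v := by
    have := pvRFin_eq b v hv0 l 0 le_rfl hv0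
    simpa [pvVal, pvValF] using this
  have hlpos : 0 < l.length :=
    Nat.pos_of_ne_zero (fun h => hne (List.eq_nil_of_length_eq_zero h))
  unfold impartirea_la_o_cifra impartirea_la_o_cifra_alt
  rw [if_neg hne]
  simp only [← hldef, hcv, hfind, pvFoldA b v l 0 0 [],
    pvParse_eq b l 0 (fun c' hc' => (hdig c' hc').1)]
  simp only [List.nil_append, ← hds, hrfin, List.length_map]
  have hval_eq : pvValF b 0 l = pvVal b l := rfl
  rw [hval_eq, PySem.Int.floordiv_eq_ediv_of_pos hv0, PySem.Int.mod_eq_emod_of_pos hv0]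
  set q := pvVal b l / v with hq
  have hbv : pvBV b 0 ds = q := by
    have := pvBV_qDigits b v hv0 l 0 0 le_rfl hv0
    simpa [pvVal, pvValF, hds] using this
  have hqnn : 0 ≤ q := Int.ediv_nonneg hvalnn (le_of_lt hv0)
  have hrem : (PySem.List.pyGet? pvHex (pvVal b l % v)).getD '?' = pvTo16c (pvVal b l % v) :=
    pvDigitChar _ (Int.emod_nonneg _ (by omega)) (by have := Int.emod_lt_of_pos (pvVal b l) hv0; omega)
  rw [hrem]
  by_cases hq0 : q = 0
  · rw [hq0, pvToBase_zero b hb0]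
    have hvlt : pvVal b l < v := by
      by_contra hge
      push_neg at hge
      have h1 : (1:Int) * v ≤ pvVal b l := by omega
      have h2 : 1 ≤ pvVal b l / v := (Int.le_ediv_iff_mul_le hv0).mpr h1
      rw [← hq] at h2
      omega
    have hl1 : l.length = 1 := by
      by_cases h2 : 2 ≤ l.length
      · exact absurd ⟨h2, hvlt⟩ hnc
      · omega
    have hds1 : ds.length = 1 := by rw [hlen, hl1]
    obtain ⟨d0, hds0⟩ := pvListLen1 ds hds1
    have hd00 : d0 = 0 := by
      have hb0' : pvBV b 0 [d0] = d0 := by simp [pvBV]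
      rw [hds0] at hbv
      omega
    have hzz : pvTo16c d0 = '0' := by
      rw [hd00]; exact (pvTo16c_eq_zero_iff 0 le_rfl (by omega)).mpr rfl
    rw [hds0]
    simp [hzz]
  · have hqpos : 0 < q := lt_of_le_of_ne hqnn (Ne.symm hq0)
    by_cases hlen1 : ds.length > 1
    · rw [if_pos hlen1, pvStrip_map ds (fun d hd => ⟨(hb15 d hd).1, (hb15 d hd).2.2⟩)]
      rcases pvDropWhile_head ds with h | ⟨d, t, he, hne'⟩
      · exfalso
        have hdw := pvBV_dropWhile b ds
        rw [h] at hdw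
        rw [show pvBV b 0 [] = 0 from rfl, hbv] at hdw
        exact hq0 hdw.symm
      · have hsub : ∀ x ∈ ds.dropWhile (fun d => d == 0), 0 ≤ x ∧ x < b ∧ x ≤ 15 :=
          fun x hx => hb15 x ((List.dropWhile_sublist _).subset hx)
        have hu := pvToBase_map b (by omega) _ hsub ⟨d, t, he, hne'⟩
        rw [pvBV_dropWhile b ds, hbv] at hu
        rw [← hu]
    · rw [if_neg hlen1]
      have hds1 : ds.length = 1 := by omega
      obtain ⟨d0, hds0⟩ := pvListLen1 ds hds1
      have hd0q : d0 = q := by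
        have hb0' : pvBV b 0 [d0] = d0 := by simp [pvBV]
        rw [hds0] at hbv
        omega
      have hu := pvToBase_map b (by omega) [d0] (by rw [← hds0]; exact hb15)
        ⟨d0, [], rfl, by omega⟩
      rw [show pvBV b 0 [d0] = d0 by simp [pvBV]] at hu
      have hu2 : pvToBase b q = List.map pvTo16c [q] := by rw [← hd0q]; exact hu
      rw [hds0, hd0q, ← hu2]

-- equivalence on a one-digit numeral with small quotient (any base >= 2)
theorem pvSingle (nr cifra : String) (baza : Int)
    (hb2 : 2 ≤ baza) (hc1 : 1 ≤ pvCifD cifra) (c0 : Char) (hl : nr.toList = [c0])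
    (h0 : 0 ≤ pvDv c0) (hqb : pvDv c0 / pvCifD cifra < baza) :
    impartirea_la_o_cifra nr cifra baza = impartirea_la_o_cifra_alt nr cifra baza := by
  obtain ⟨c, hcl⟩ : ∃ c, cifra.toList = [c] := by
    rcases hl' : cifra.toList with _ | ⟨c, _ | ⟨c', t⟩⟩
    · simp [pvCifD, hl'] at hc1
    · exact ⟨c, rfl⟩
    · simp [pvCifD, hl'] at hc1
  have hcd : pvCifD cifra = pvDv c := by simp [pvCifD, hcl]
  rw [hcd] at hc1 hqb
  have hmem : c ∈ pvHex := pvDv_mem c (by omega)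
  have h15 : pvDv c ≤ 15 := (pvDv_idx c hmem).2
  obtain ⟨hfind, hcv⟩ := pvCif_val cifra c hmem hcl
  have h015 : pvDv c0 ≤ 15 := (pvDv_idx c0 (pvDv_mem c0 h0)).2
  set v := pvDv c with hvdef
  have hv0 : (0:Int) < v := by omega
  unfold impartirea_la_o_cifra impartirea_la_o_cifra_alt
  rw [if_neg (by rw [hl]; simp)]
  simp only [hl, hcv, hfind, List.foldl_cons, List.foldl_nil, pvStepA, zero_mul, zero_add]
  simp only [List.nil_append, List.length_cons, List.length_nil]
  rw [if_neg (by omega), ← (pvDv_idx c0 (pvDv_mem c0 h0)).1,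
    PySem.Int.floordiv_eq_ediv_of_pos hv0, PySem.Int.mod_eq_emod_of_pos hv0]
  have hqnn : 0 ≤ pvDv c0 / v := Int.ediv_nonneg h0 (le_of_lt hv0)
  have hq15 : pvDv c0 / v ≤ 15 := le_trans (Int.ediv_le_self v h0) h015
  rw [pvToBase, dif_pos (Or.inr hqb),
    pvDigitChar _ hqnn (by omega),
    pvDigitChar _ (Int.emod_nonneg _ (by omega))
      (by have := Int.emod_lt_of_pos (pvDv c0) hv0; omega)]

-- ===== VERDICT (by name: the statement is the Claim_ definition above) =====
theorem impartirea_la_o_cifra_spec : Claim_equal_impartirea_la_o_cifra := by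
  intro nr cifra baza _ hpre
  unfold Spec_impartirea_la_o_cifra
  rcases hpre with hemp | ⟨hb2, hc1, hsp, hall, hnc⟩ | ⟨hl1, hb2, hc1, h0, hqb⟩
  · unfold impartirea_la_o_cifra impartirea_la_o_cifra_alt
    rw [if_pos hemp, hemp]
    rfl
  · have hdig : ∀ c ∈ nr.toList, 0 ≤ pvDv c ∧ pvDv c < baza := by
      intro c hc
      have h := List.all_eq_true.mp hall c hc
      simp only [Bool.and_eq_true, decide_eq_true_iff] at h
      exact h
    by_cases hne : nr.toList = []
    · unfold impartirea_la_o_cifra impartirea_la_o_cifra_alt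
      rw [if_pos hne, hne]
      rfl
    · exact pvMain nr cifra baza hb2 hsp hc1 hdig hnc hne
  · obtain ⟨c0, hc0⟩ := pvListLen1 nr.toList hl1
    rw [hc0] at h0 hqb
    simp only [List.headD_cons] at h0 hqb
    exact pvSingle nr cifra baza hb2 hc1 c0 hc0 h0 hqb

set_option maxRecDepth 20000 in
theorem pvRaiseEval : impartirea_la_o_cifra_alt (pvRaiseWitness_impartirea_la_o_cifra.1) (pvRaiseWitness_impartirea_la_o_cifra.2.1) (pvRaiseWitness_impartirea_la_o_cifra.2.2) = pvRaiseWitnessOut_impartirea_la_o_cifra := by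
  have hq : PySem.Int.floordiv (("01" : String).toList.foldl (fun v c => v * 10 + ((PySem.List.index? pvHex c).getD 16 : Int)) 0) (PySem.Str.find "0123456789ABCDEF" "2") = (0 : Int) := by decide
  have hr : PySem.Int.mod (("01" : String).toList.foldl (fun v c => v * 10 + ((PySem.List.index? pvHex c).getD 16 : Int)) 0) (PySem.Str.find "0123456789ABCDEF" "2") = (1 : Int) := by decide
  show (String.ofList (pvToBase 10 (PySem.Int.floordiv (("01" : String).toList.foldl (fun v c => v * 10 + ((PySem.List.index? pvHex c).getD 16 : Int)) 0) (PySem.Str.find "0123456789ABCDEF" "2"))),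
        String.ofList [(PySem.List.pyGet? pvHex (PySem.Int.mod (("01" : String).toList.foldl (fun v c => v * 10 + ((PySem.List.index? pvHex c).getD 16 : Int)) 0) (PySem.Str.find "0123456789ABCDEF" "2"))).getD '?']) = ("0", "1")
  rw [hq, hr, pvToBase_zero 10 (by norm_num)]
  decide

@[simp]
theorem impartirea_la_o_cifra_raises : Claim_raises_impartirea_la_o_cifra := by
  unfold Claim_raises_impartirea_la_o_cifra
  constructor
  · intro nr cifra baza _ hr hpre
    rcases hr with ⟨_, _, _, hlen, hlt⟩
    rcases hpre with hemp | ⟨_, _, _, _, hnc⟩ | ⟨hl1, _⟩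
    · rw [hemp] at hlen; simp at hlen
    · exact hnc ⟨hlen, hlt⟩
    · omega
  · have hD : Dom_impartirea_la_o_cifra "01" "2" 10 := by decide
    have hR : Raises_impartirea_la_o_cifra "01" "2" 10 := by decide
    exact ⟨hD, hR, pvRaiseEval⟩
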